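-- pv_equiv track=rewrite | github.com/MSadraA/DS | ca1/4_2.py | points_per_rows
-- ===== SOURCE A (Python) =====
-- BLOCK = '#'
--
-- def points_per_rows(matrix):
--     counter = 0
--     l = []
--     tmp = []
--     for i in matrix:
--         for j in i:
--             if (j == BLOCK):
--                 tmp.append(counter)
--                 counter = 0
--                 continue
--             counter += 1
--         tmp.append(counter)
--         l.append(tmp)
--         tmp = []
--         counter = 0
--     return l
-- ===== SOURCE B (Python) =====
-- BLOCK = '#'
--
-- def _gaps(row):
--     try:
--         k = row.index(BLOCK)
--     except ValueError:
--         return [len(row)]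
--     return [k] + _gaps(row[k + 1:])
--
-- def points_per_rows(matrix):
--     return [_gaps(row) for row in matrix]
-- ===== Notes on version B (the rewrite author's own statement) =====
-- stated objective: alternative
-- what changed: B replaces A's single stateful pass with counter/tmp/l accumulators by a recursive separator-splitting decomposition: each row's gaps are computed by locating the next '#' with list.index and recursing on the slice after it, mapped over the rows.
import Mathlib
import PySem

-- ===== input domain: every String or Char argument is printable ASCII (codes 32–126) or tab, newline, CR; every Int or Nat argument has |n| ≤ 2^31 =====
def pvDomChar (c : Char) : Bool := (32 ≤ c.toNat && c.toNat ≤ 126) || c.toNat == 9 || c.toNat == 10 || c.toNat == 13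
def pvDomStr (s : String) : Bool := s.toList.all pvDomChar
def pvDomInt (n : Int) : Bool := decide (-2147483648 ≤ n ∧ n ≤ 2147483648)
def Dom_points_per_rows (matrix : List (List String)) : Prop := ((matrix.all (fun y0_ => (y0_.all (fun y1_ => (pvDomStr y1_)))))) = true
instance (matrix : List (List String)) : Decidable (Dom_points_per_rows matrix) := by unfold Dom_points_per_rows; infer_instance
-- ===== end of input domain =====

-- B recomputes A's per-row run lengths by locating each '#' with index and recursing on the
-- slice after it (alternative decomposition; return value proved equal everywhere).

-- ===== PORT A =====
-- inner loop body: 'if j == BLOCK: tmp.append(counter); counter = 0; continue / counter += 1'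
def pprInner (s : Int × List Int) (j : String) : Int × List Int :=
  if j = "#" then (0, s.2 ++ [s.1]) else (s.1 + 1, s.2)

-- outer loop body over a row i: run the inner loop, then tmp.append(counter); l.append(tmp); tmp=[]; counter=0
def pprStep (st : Int × List (List Int) × List Int) (i : List String) :
    Int × List (List Int) × List Int :=
  let s := i.foldl pprInner (st.1, st.2.2)
  (0, st.2.1 ++ [s.2 ++ [s.1]], [])

def points_per_rows (matrix : List (List String)) : List (List Int) :=
  (matrix.foldl pprStep (0, [], [])).2.1

-- ===== PORT B =====
-- _gaps: try k = row.index('#') except ValueError: return [len(row)]; return [k] + _gaps(row[k+1:])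
def pprGaps (row : List String) : List Int :=
  match h : PySem.List.index? row "#" with
  | none => [(row.length : Int)]
  | some k => (k : Int) :: pprGaps (PySem.List.slice row (some ((k : Int) + 1)) none)
termination_by row.length
decreasing_by
  obtain ⟨hk, -, -⟩ := PySem.List.getElem_of_index?_eq_some h
  rw [PySem.List.slice_from]
  · simp only [List.length_drop]; omega
  · positivity

def points_per_rows_alt (matrix : List (List String)) : List (List Int) :=
  matrix.map pprGaps

-- ===== PRECONDITION & SPEC =====
def Spec_points_per_rows (matrix : List (List String)) (out : List (List Int)) : Prop := out = points_per_rows_alt matrix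
instance (matrix : List (List String)) (out : List (List Int)) : Decidable (Spec_points_per_rows matrix out) := by unfold Spec_points_per_rows; infer_instance

-- ===== CLAIM (what is proved, stated in full; the proofs are below) =====
def Claim_equal_points_per_rows : Prop := ∀ (matrix : List (List String)), Dom_points_per_rows matrix → Spec_points_per_rows matrix (points_per_rows matrix)

-- ===== LEMMAS AND PROOFS =====

/-- add `c` to the head of a list (identity on `[]`). -/
def addHead (c : Int) : List Int → List Int
  | [] => []
  | x :: xs => (c + x) :: xs

theorem addHead_zero (l : List Int) : addHead 0 l = l := by
  cases l
  · rfl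
  · simp [addHead]

theorem addHead_addHead (a b : Int) (l : List Int) :
    addHead a (addHead b l) = addHead (a + b) l := by
  cases l
  · rfl
  · simp [addHead]; ring

theorem pprGaps_eq_none (row : List String) (h : PySem.List.index? row "#" = none) :
    pprGaps row = [(row.length : Int)] := by
  rw [pprGaps]
  split
  · rfl
  · rename_i k heq; rw [h] at heq; cases heq

theorem pprGaps_eq_some (row : List String) (k : Nat)
    (h : PySem.List.index? row "#" = some k) :
    pprGaps row = (k : Int) :: pprGaps (PySem.List.slice row (some ((k : Int) + 1)) none) := by
  rw [pprGaps]
  split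
  · rename_i heq; rw [h] at heq; cases heq
  · rename_i k' heq
    rw [h] at heq
    injection heq with hk
    subst hk
    rfl

theorem pprGaps_nil : pprGaps [] = [0] := by
  rw [pprGaps_eq_none]
  · rfl
  · simp

theorem pprGaps_cons_block (rest : List String) :
    pprGaps ("#" :: rest) = 0 :: pprGaps rest := by
  rw [pprGaps_eq_some _ 0 (PySem.List.index?_cons_self _ _)]
  rw [PySem.List.slice_from]
  · norm_num
  · norm_num

theorem pprGaps_cons_ne (j : String) (rest : List String) (hj : j ≠ "#") :
    pprGaps (j :: rest) = addHead 1 (pprGaps rest) := by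
  cases h : PySem.List.index? rest "#" with
  | none =>
      have h' : PySem.List.index? (j :: rest) "#" = none := by
        rw [PySem.List.index?_cons_of_ne _ hj, h]; rfl
      rw [pprGaps_eq_none _ h', pprGaps_eq_none _ h]
      simp [addHead]
      omega
  | some k =>
      have h' : PySem.List.index? (j :: rest) "#" = some (k + 1) := by
        rw [PySem.List.index?_cons_of_ne _ hj, h]; rfl
      rw [pprGaps_eq_some _ _ h', pprGaps_eq_some _ _ h]
      rw [PySem.List.slice_from]
      case ha => positivity
      rw [PySem.List.slice_from]
      case ha => positivity
      have h1 : (((k : Int) + 1 + 1)).toNat = k + 2 := by omega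
      have h2 : (((k : Int) + 1)).toNat = k + 1 := by omega
      push_cast
      rw [h1, h2]
      simp [addHead, List.drop_succ_cons]
      ring

/-- A's inner row loop, continued by the trailing `tmp.append(counter)`, computes the gaps. -/
theorem row_bridge (row : List String) : ∀ (c : Int) (t : List Int),
    (row.foldl pprInner (c, t)).2 ++ [(row.foldl pprInner (c, t)).1]
      = t ++ addHead c (pprGaps row) := by
  induction row with
  | nil => intro c t; simp [pprGaps_nil, addHead]
  | cons j rest ih =>
      intro c t
      by_cases hj : j = "#"
      · subst hj
        have hstep : pprInner (c, t) "#" = (0, t ++ [c]) := by simp [pprInner]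
        simp only [List.foldl_cons, hstep]
        rw [ih 0 (t ++ [c]), pprGaps_cons_block, addHead_zero]
        simp [addHead]
      · have hstep : pprInner (c, t) j = (c + 1, t) := by simp [pprInner, hj]
        simp only [List.foldl_cons, hstep]
        rw [ih (c + 1) t, pprGaps_cons_ne j rest hj, addHead_addHead]

/-- A's outer loop appends one gaps list per row. -/
theorem outer_bridge (rows : List (List String)) : ∀ (acc : List (List Int)),
    (rows.foldl pprStep (0, acc, [])).2.1 = acc ++ rows.map pprGaps := by
  induction rows with
  | nil => intro acc; simp
  | cons r rest ih =>
      intro acc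
      simp only [List.foldl_cons, pprStep, List.map_cons]
      have hrow := row_bridge r 0 []
      rw [addHead_zero] at hrow
      simp only [List.nil_append] at hrow
      rw [hrow, ih]
      simp

-- ===== VERDICT (by name: the statement is the Claim_ definition above) =====
theorem points_per_rows_spec : Claim_equal_points_per_rows := by
  intro matrix _
  show points_per_rows matrix = points_per_rows_alt matrix
  rw [points_per_rows, points_per_rows_alt, outer_bridge]
  simp
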